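-- pv_equiv track=rewrite | github.com/lyg1597/alpha-beta-CROWN | nerf_exp/test_sort.py | get_set_order
-- ===== SOURCE A (Python) =====
-- def get_set_order(sorted_bounds):
--     res_list = []
--     for i in range(len(sorted_bounds)):
--         bins = []
--         ref_bound = sorted_bounds[i]
--         for j in range(len(sorted_bounds)):
--             bound = sorted_bounds[j]
--             if ref_bound[0]<=bound[1]<=ref_bound[1] or \
--                 ref_bound[0]<=bound[0]<=ref_bound[1] or \
--                 bound[0]<=ref_bound[0]<=bound[1] or \
--                 bound[0]<=ref_bound[1]<=bound[1]:
--                 bins.append(bound[2])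
--         res_list.append(bins)
--     return res_list
-- ===== SOURCE B (Python) =====
-- def _overlaps(a, b):
--     return (a[0] <= b[0] <= a[1] or a[0] <= b[1] <= a[1]
--             or b[0] <= a[0] <= b[1] or b[0] <= a[1] <= b[1])
--
-- def get_set_order(sorted_bounds):
--     n = len(sorted_bounds)
--     res = [[] for _ in range(n)]
--     for i in range(n):
--         a = sorted_bounds[i]
--         if _overlaps(a, a):
--             res[i].append(a[2])
--         for j in range(i + 1, n):
--             b = sorted_bounds[j]
--             if _overlaps(a, b):
--                 res[i].append(b[2])
--                 res[j].append(a[2])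
--     return res
-- ===== Notes on version B (the rewrite author's own statement) =====
-- stated objective: alternative
-- what changed: B exploits the symmetry of A's overlap predicate: a single triangular pass over unordered pairs (j > i) evaluates the predicate once per pair and pushes each id into both rows, instead of A's full n x n double loop.
import Mathlib
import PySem

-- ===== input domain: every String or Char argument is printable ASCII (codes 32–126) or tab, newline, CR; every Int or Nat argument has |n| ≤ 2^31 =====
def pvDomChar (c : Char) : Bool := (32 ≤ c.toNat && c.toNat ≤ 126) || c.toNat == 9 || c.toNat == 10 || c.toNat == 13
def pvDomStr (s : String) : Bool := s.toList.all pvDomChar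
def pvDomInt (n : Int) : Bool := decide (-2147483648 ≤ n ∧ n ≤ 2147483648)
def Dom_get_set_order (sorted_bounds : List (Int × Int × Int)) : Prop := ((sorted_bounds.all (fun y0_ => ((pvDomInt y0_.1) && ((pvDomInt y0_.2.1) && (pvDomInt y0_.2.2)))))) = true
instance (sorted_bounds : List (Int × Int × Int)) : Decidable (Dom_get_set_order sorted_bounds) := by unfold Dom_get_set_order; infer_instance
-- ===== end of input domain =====

-- B replaces A's full n×n double loop by a single triangular pass over unordered pairs,
-- using the symmetry of the overlap predicate to push each id into both rows
-- (alternative decomposition; same asymptotic cost).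

-- ===== PORT A =====
-- A's four-clause overlap test, clauses in A's order
def predA (a b : Int × Int × Int) : Bool :=
  (decide (a.1 ≤ b.2.1) && decide (b.2.1 ≤ a.2.1)) ||
  (decide (a.1 ≤ b.1) && decide (b.1 ≤ a.2.1)) ||
  (decide (b.1 ≤ a.1) && decide (a.1 ≤ b.2.1)) ||
  (decide (b.1 ≤ a.2.1) && decide (a.2.1 ≤ b.2.1))

def get_set_order (sorted_bounds : List (Int × Int × Int)) : List (List Int) :=
  sorted_bounds.foldl
    (fun res_list ref_bound =>
      res_list ++
        [sorted_bounds.foldl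
          (fun bins bound => if predA ref_bound bound then bins ++ [bound.2.2] else bins) []])
    []

-- ===== PORT B =====
-- B's overlap test (_overlaps in Source B), clauses in Source B's order
def ovB (a b : Int × Int × Int) : Bool :=
  (decide (a.1 ≤ b.1) && decide (b.1 ≤ a.2.1)) ||
  (decide (a.1 ≤ b.2.1) && decide (b.2.1 ≤ a.2.1)) ||
  (decide (b.1 ≤ a.1) && decide (a.1 ≤ b.2.1)) ||
  (decide (b.1 ≤ a.2.1) && decide (a.2.1 ≤ b.2.1))

-- res[p].append(x)
def pushAt (st : List (List Int)) (p : Nat) (x : Int) : List (List Int) :=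
  st.modify p (fun l => l ++ [x])

-- inner loop 'for j in range(i+1, n)'
def innerB (i : Nat) (a : Int × Int × Int) :
    Nat → List (Int × Int × Int) → List (List Int) → List (List Int)
  | _, [], st => st
  | j, b :: rest, st =>
      innerB i a (j + 1) rest
        (if ovB a b then pushAt (pushAt st i b.2.2) j a.2.2 else st)

-- outer loop 'for i in range(n)'
def outerB : Nat → List (Int × Int × Int) → List (List Int) → List (List Int)
  | _, [], st => st
  | i, a :: rest, st =>
      outerB (i + 1) rest
        (innerB i a (i + 1) rest (if ovB a a then pushAt st i a.2.2 else st))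

def get_set_order_alt (sorted_bounds : List (Int × Int × Int)) : List (List Int) :=
  outerB 0 sorted_bounds (sorted_bounds.map fun _ => [])

-- ===== PRECONDITION & SPEC =====
def Spec_get_set_order (sorted_bounds : List (Int × Int × Int)) (out : List (List Int)) : Prop := out = get_set_order_alt sorted_bounds
instance (sorted_bounds : List (Int × Int × Int)) (out : List (List Int)) : Decidable (Spec_get_set_order sorted_bounds out) := by unfold Spec_get_set_order; infer_instance

-- ===== CLAIM (what is proved, stated in full; the proofs are below) =====
def Claim_equal_get_set_order : Prop := ∀ (sorted_bounds : List (Int × Int × Int)), Dom_get_set_order sorted_bounds → Spec_get_set_order sorted_bounds (get_set_order sorted_bounds)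

-- ===== LEMMAS AND PROOFS =====

-- the row produced for reference interval a
def mapFilter (a : Int × Int × Int) (l : List (Int × Int × Int)) : List Int :=
  (l.filter (fun b => ovB a b)).map (fun b => b.2.2)

theorem ovB_eq_predA (a b : Int × Int × Int) : ovB a b = predA a b := by
  unfold ovB predA
  generalize (decide (a.1 ≤ b.1) && decide (b.1 ≤ a.2.1)) = c2
  generalize (decide (a.1 ≤ b.2.1) && decide (b.2.1 ≤ a.2.1)) = c1
  cases c1 <;> cases c2 <;> simp

theorem ovB_symm (a b : Int × Int × Int) : ovB a b = ovB b a := by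
  unfold ovB
  generalize (decide (a.1 ≤ b.1) && decide (b.1 ≤ a.2.1)) = c2
  generalize (decide (a.1 ≤ b.2.1) && decide (b.2.1 ≤ a.2.1)) = c1
  generalize (decide (b.1 ≤ a.1) && decide (a.1 ≤ b.2.1)) = c3
  generalize (decide (b.1 ≤ a.2.1) && decide (a.2.1 ≤ b.2.1)) = c4
  cases c1 <;> cases c2 <;> cases c3 <;> cases c4 <;> simp

theorem mapFilter_cons (a b : Int × Int × Int) (l : List (Int × Int × Int)) :
    mapFilter a (b :: l) = (if ovB a b then [b.2.2] else []) ++ mapFilter a l := by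
  unfold mapFilter
  by_cases h : ovB a b = true <;> simp [h]

theorem length_pushAt (st : List (List Int)) (p : Nat) (x : Int) :
    (pushAt st p x).length = st.length := by
  simp [pushAt]

theorem get_pushAt (st : List (List Int)) (p : Nat) (x : Int) (r : Nat) (hr : r < st.length) :
    (pushAt st p x)[r]! = if p = r then st[r]! ++ [x] else st[r]! := by
  have h1 : r < (pushAt st p x).length := by rw [length_pushAt]; exact hr
  rw [getElem!_pos _ r h1, getElem!_pos st r hr]
  simp [pushAt, List.getElem_modify]

theorem length_innerB (i : Nat) (a : Int × Int × Int) (j : Nat)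
    (rest : List (Int × Int × Int)) (st : List (List Int)) :
    (innerB i a j rest st).length = st.length := by
  induction rest generalizing j st with
  | nil => rfl
  | cons b rest ih =>
      rw [innerB, ih]
      by_cases h : ovB a b = true <;> simp [h, length_pushAt]

theorem length_outerB (i : Nat) (rest : List (Int × Int × Int)) (st : List (List Int)) :
    (outerB i rest st).length = st.length := by
  induction rest generalizing i st with
  | nil => rfl
  | cons a rest ih =>
      rw [outerB, ih, length_innerB]
      by_cases h : ovB a a = true <;> simp [h, length_pushAt]

theorem get_innerB (a : Int × Int × Int) (rest : List (Int × Int × Int))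
    (i j : Nat) (st : List (List Int)) (r : Nat)
    (hij : i < j) (hlen : j + rest.length ≤ st.length) (hr : r < st.length) :
    (innerB i a j rest st)[r]! =
      if r = i then st[r]! ++ mapFilter a rest
      else if j ≤ r ∧ r < j + rest.length then
        st[r]! ++ (if ovB a rest[r - j]! then [a.2.2] else [])
      else st[r]! := by
  induction rest generalizing j st with
  | nil =>
      simp only [innerB, mapFilter, List.filter_nil, List.map_nil, List.append_nil,
        List.length_nil, Nat.add_zero]
      split_ifs with h1 h2 <;> first | rfl | omega
  | cons b rest ih =>
      rw [innerB]
      set st' := if ovB a b then pushAt (pushAt st i b.2.2) j a.2.2 else st with hst'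
      have hlen' : st'.length = st.length := by
        by_cases h : ovB a b = true <;> simp [hst', h, length_pushAt]
      have hlc : j + (rest.length + 1) ≤ st.length := by
        simpa [List.length_cons] using hlen
      have hi : i < st.length := by omega
      have hj : j < st.length := by omega
      have hget : ∀ q, q < st.length →
          st'[q]! = if q = i then st[q]! ++ (if ovB a b then [b.2.2] else [])
            else if q = j then st[q]! ++ (if ovB a b then [a.2.2] else [])
            else st[q]! := by
        intro q hq
        by_cases h : ovB a b = true
        · have h2 : q < (pushAt st i b.2.2).length := by rw [length_pushAt]; exact hq
          rw [hst', if_pos h, get_pushAt _ _ _ _ h2, get_pushAt _ _ _ _ hq]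
          by_cases e1 : q = i
          · rw [if_neg (by omega), if_pos e1.symm, if_pos e1, if_pos h]
          · by_cases e2 : q = j
            · rw [if_pos e2.symm, if_neg (fun hc => e1 hc.symm), if_neg e1, if_pos e2, if_pos h]
            · rw [if_neg (fun hc => e2 hc.symm), if_neg (fun hc => e1 hc.symm),
                if_neg e1, if_neg e2]
        · have h' : ovB a b = false := by simpa using h
          simp [hst', h']
      rw [ih (j + 1) st' (by omega) (by rw [hlen']; omega) (by rw [hlen']; exact hr)]
      rw [mapFilter_cons]
      by_cases e1 : r = i
      · rw [if_pos e1, if_pos e1, hget r hr, if_pos e1]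
        simp [List.append_assoc]
      · rw [if_neg e1, if_neg e1]
        by_cases e2 : r = j
        · have hne : ¬ (j + 1 ≤ r ∧ r < j + 1 + rest.length) := by omega
          have hc : j ≤ r ∧ r < j + (b :: rest).length := by
            simp only [List.length_cons]; omega
          rw [if_neg hne, if_pos hc, hget r hr, if_neg e1, if_pos e2]
          subst e2
          simp
        · have hst'r : st'[r]! = st[r]! := by rw [hget r hr, if_neg e1, if_neg e2]
          by_cases e3 : j + 1 ≤ r ∧ r < j + 1 + rest.length
          · have hc : j ≤ r ∧ r < j + (b :: rest).length := by
              simp only [List.length_cons]; omega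
            have hidx : (b :: rest)[r - j]! = rest[r - (j + 1)]! := by
              have h4 : r - j = (r - (j + 1)) + 1 := by omega
              rw [h4]
              simp
            rw [if_pos e3, if_pos hc, hst'r, hidx]
          · have hc : ¬ (j ≤ r ∧ r < j + (b :: rest).length) := by
              simp only [List.length_cons]; omega
            rw [if_neg e3, if_neg hc, hst'r]

theorem get_outerB (rest : List (Int × Int × Int)) (i : Nat) (st : List (List Int))
    (hlen : st.length = i + rest.length) (r : Nat) (hr : r < st.length) :
    (outerB i rest st)[r]! =
      if r < i then st[r]! else st[r]! ++ mapFilter rest[r - i]! rest := by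
  induction rest generalizing i st with
  | nil =>
      simp only [outerB]
      have : r < i := by simp at hlen; omega
      rw [if_pos this]
  | cons a rest ih =>
      rw [outerB]
      set st1 := if ovB a a then pushAt st i a.2.2 else st with hst1
      have hlen1 : st1.length = st.length := by
        by_cases h : ovB a a = true <;> simp [hst1, h, length_pushAt]
      have hi : i < st.length := by simp at hlen; omega
      set st2 := innerB i a (i + 1) rest st1 with hst2
      have hlen2 : st2.length = st.length := by rw [hst2, length_innerB, hlen1]
      have hget1 : ∀ q, q < st.length →
          st1[q]! = if q = i then st[q]! ++ (if ovB a a then [a.2.2] else []) else st[q]! := by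
        intro q hq
        by_cases h : ovB a a = true
        · rw [hst1, if_pos h, get_pushAt _ _ _ _ hq]
          by_cases e : q = i <;> simp [e, h] ; omega
        · have h' : ovB a a = false := by simpa using h
          simp [hst1, h']
      have hget2 : ∀ q, q < st.length →
          st2[q]! = if q = i then st1[q]! ++ mapFilter a rest
            else if i + 1 ≤ q ∧ q < i + 1 + rest.length then
              st1[q]! ++ (if ovB a rest[q - (i + 1)]! then [a.2.2] else [])
            else st1[q]! := by
        intro q hq
        exact get_innerB a rest i (i + 1) st1 q (by omega)
          (by rw [hlen1]; simp at hlen ⊢; omega) (by rw [hlen1]; exact hq)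
      rw [ih (i + 1) st2 (by rw [hlen2, hlen]; simp only [List.length_cons]; omega) (by rw [hlen2]; exact hr)]
      by_cases e0 : r < i
      · rw [if_pos (by omega), if_pos e0, hget2 r hr, if_neg (by omega),
          if_neg (by omega), hget1 r hr, if_neg (by omega)]
      · rw [if_neg e0]
        by_cases e1 : r = i
        · rw [if_pos (by omega), hget2 r hr, if_pos e1, hget1 r hr, if_pos e1]
          subst e1
          have : (a :: rest)[r - r]! = a := by simp
          rw [this, mapFilter_cons, List.append_assoc]
        · have hgt : i + 1 ≤ r := by omega
          rw [if_neg (by omega), hget2 r hr, if_neg e1,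
            if_pos (by constructor <;> [omega; (simp at hr hlen ⊢; omega)]),
            hget1 r hr, if_neg e1]
          have hidx : (a :: rest)[r - i]! = rest[r - (i + 1)]! := by
            have h4 : r - i = (r - (i + 1)) + 1 := by omega
            rw [h4]
            simp
          rw [hidx, mapFilter_cons, ovB_symm, List.append_assoc]

theorem get_set_order_eq_map (sb : List (Int × Int × Int)) :
    get_set_order sb = sb.map (fun a => mapFilter a sb) := by
  unfold get_set_order
  rw [PySem.List.foldl_append_singleton_eq_map]
  simp only [List.nil_append]
  refine List.map_congr_left ?_
  intro a _
  rw [PySem.List.foldl_append_if]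
  simp only [List.nil_append, mapFilter]
  congr 1
  refine List.filter_congr ?_
  intro b _
  rw [ovB_eq_predA]

-- ===== VERDICT (by name: the statement is the Claim_ definition above) =====
theorem get_set_order_spec : Claim_equal_get_set_order := by
  intro sb _
  unfold Spec_get_set_order get_set_order_alt
  rw [get_set_order_eq_map]
  have hlen : (sb.map fun (_ : Int × Int × Int) => ([] : List Int)).length = sb.length := by simp
  apply List.ext_getElem
  · rw [length_outerB]
    simp
  · intro r h1 h2
    have hr : r < sb.length := by simpa using h1
    have hmap : r < (sb.map fun (_ : Int × Int × Int) => ([] : List Int)).length := by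
      simpa using hr
    have h3 : r < (outerB 0 sb (sb.map fun _ => [])).length := by
      rw [length_outerB]; simpa using hr
    rw [← getElem!_pos _ r h1, ← getElem!_pos _ r h3]
    rw [get_outerB sb 0 _ (by simp) r (by simpa using hr)]
    rw [if_neg (by omega)]
    have hempty : (sb.map fun (_ : Int × Int × Int) => ([] : List Int))[r]! = [] := by
      rw [getElem!_pos _ r hmap]
      simp
    rw [hempty, List.nil_append, Nat.sub_zero]
    rw [getElem!_pos _ r h1, getElem!_pos sb r hr]
    simp
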